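-- pv_equiv track=rewrite | github.com/simomosi/advent_of_code | 2022/25/full_of_hot_air.py | encode_snafu
-- ===== SOURCE A (Python) =====
-- def encode_snafu(decimal_number:int) -> str:
--     q = decimal_number
--     r = 0
--     result = ''
--     while q > 0:
--         r = q % 5
--         q //= 5
--         # Increment the next power by 1 unit, then "subtract" -2 (3 = 5-2) or -1 (4 = 5-1)
--         # e.g. 4/5 -> q=0 r=4 but also q = 1 r = 5-1 = -1 = character "-"
--         if r > 2:
--             q += 1
--             if r == 3:
--                 result += '='
--             elif r == 4:
--                 result += '-'
--         else:
--             result += str(r)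
--     return result[::-1]
-- ===== SOURCE B (Python) =====
-- def encode_snafu(decimal_number: int) -> str:
--     # Recursive, most-significant-digit-first: no reversal needed.
--     if decimal_number <= 0:
--         return ''
--     r = decimal_number % 5
--     if r <= 2:
--         return encode_snafu(decimal_number // 5) + str(r)
--     if r == 3:
--         return encode_snafu(decimal_number // 5 + 1) + '='
--     return encode_snafu(decimal_number // 5 + 1) + '-'
-- ===== Notes on version B (the rewrite author's own statement) =====
-- stated objective: simpler
-- what changed: Replaced the imperative while-loop that accumulates digits least-significant-first into a string and then reverses it with a direct recursion that emits digits most-significant-first, eliminating the accumulator and the [::-1] reversal.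
import Mathlib
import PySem

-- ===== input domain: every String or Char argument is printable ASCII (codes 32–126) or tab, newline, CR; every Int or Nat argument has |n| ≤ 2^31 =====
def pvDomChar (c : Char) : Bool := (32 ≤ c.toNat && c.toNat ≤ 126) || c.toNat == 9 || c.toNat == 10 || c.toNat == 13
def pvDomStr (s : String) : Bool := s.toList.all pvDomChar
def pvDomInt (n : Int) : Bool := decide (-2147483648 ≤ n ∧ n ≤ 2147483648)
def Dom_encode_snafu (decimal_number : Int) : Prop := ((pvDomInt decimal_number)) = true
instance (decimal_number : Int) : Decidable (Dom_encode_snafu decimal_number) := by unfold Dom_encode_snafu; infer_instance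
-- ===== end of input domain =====

-- B replaces A's lsd-first accumulate-then-reverse loop with a direct msd-first recursion (simpler; same cost).

-- ===== PORT A =====
-- the while loop, state = (q, result); r is recomputed each iteration
def encode_snafu_loop (q : Int) (result : String) : String :=
  if _h : q > 0 then
    let r := PySem.Int.mod q 5
    let q' := PySem.Int.floordiv q 5
    if r > 2 then
      encode_snafu_loop (q' + 1)
        (if r = 3 then result ++ "=" else if r = 4 then result ++ "-" else result)
    else
      encode_snafu_loop q' (result ++ PySem.Int.toStr r)
  else
    result
termination_by q.toNat
decreasing_by
  · have h1 := PySem.Int.floordiv_mul_add_mod q 5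
    have h2 := PySem.Int.mod_nonneg q (b := 5) (by norm_num)
    have h3 := PySem.Int.mod_lt q (b := 5) (by norm_num)
    simp only [q', r] at *
    omega
  · have h1 := PySem.Int.floordiv_mul_add_mod q 5
    have h2 := PySem.Int.mod_nonneg q (b := 5) (by norm_num)
    have h3 := PySem.Int.mod_lt q (b := 5) (by norm_num)
    simp only [q', r] at *
    omega

def encode_snafu (decimal_number : Int) : String :=
  -- result[::-1]
  (PySem.Str.slice? (encode_snafu_loop decimal_number "") none none (-1)).getD ""

-- ===== PORT B =====
def encode_snafu_alt (decimal_number : Int) : String :=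
  if _h : decimal_number ≤ 0 then ""
  else
    let r := PySem.Int.mod decimal_number 5
    if r ≤ 2 then
      encode_snafu_alt (PySem.Int.floordiv decimal_number 5) ++ PySem.Int.toStr r
    else if r = 3 then
      encode_snafu_alt (PySem.Int.floordiv decimal_number 5 + 1) ++ "="
    else
      encode_snafu_alt (PySem.Int.floordiv decimal_number 5 + 1) ++ "-"
termination_by decimal_number.toNat
decreasing_by
  · have h1 := PySem.Int.floordiv_mul_add_mod decimal_number 5
    have h2 := PySem.Int.mod_nonneg decimal_number (b := 5) (by norm_num)
    have h3 := PySem.Int.mod_lt decimal_number (b := 5) (by norm_num)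
    simp only [r] at *
    omega
  · have h1 := PySem.Int.floordiv_mul_add_mod decimal_number 5
    have h2 := PySem.Int.mod_nonneg decimal_number (b := 5) (by norm_num)
    have h3 := PySem.Int.mod_lt decimal_number (b := 5) (by norm_num)
    simp only [r] at *
    omega
  · have h1 := PySem.Int.floordiv_mul_add_mod decimal_number 5
    have h2 := PySem.Int.mod_nonneg decimal_number (b := 5) (by norm_num)
    have h3 := PySem.Int.mod_lt decimal_number (b := 5) (by norm_num)
    simp only [r] at *
    omega

-- ===== PRECONDITION & SPEC =====
def Spec_encode_snafu (decimal_number : Int) (out : String) : Prop := out = encode_snafu_alt decimal_number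
instance (decimal_number : Int) (out : String) : Decidable (Spec_encode_snafu decimal_number out) := by unfold Spec_encode_snafu; infer_instance

-- ===== CLAIM (what is proved, stated in full; the proofs are below) =====
def Claim_equal_encode_snafu : Prop := ∀ (decimal_number : Int), Dom_encode_snafu decimal_number → Spec_encode_snafu decimal_number (encode_snafu decimal_number)

-- ===== LEMMAS AND PROOFS =====

def strRev (s : String) : String := String.ofList s.toList.reverse

theorem strRev_append (s t : String) : strRev (s ++ t) = strRev t ++ strRev s := by
  rw [← String.toList_inj]
  simp [strRev]

theorem strRev_rev (s : String) : strRev (strRev s) = s := by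
  rw [← String.toList_inj]
  simp [strRev]

theorem strRev_eq : strRev "=" = "=" := rfl
theorem strRev_dash : strRev "-" = "-" := rfl
theorem strRev_empty : strRev "" = "" := rfl
theorem strRev_d0 : strRev (PySem.Int.toStr 0) = PySem.Int.toStr 0 := rfl
theorem strRev_d1 : strRev (PySem.Int.toStr 1) = PySem.Int.toStr 1 := rfl
theorem strRev_d2 : strRev (PySem.Int.toStr 2) = PySem.Int.toStr 2 := rfl

theorem loop_eq (q : Int) (result : String) :
    encode_snafu_loop q result = result ++ strRev (encode_snafu_alt q) := by
  induction q, result using encode_snafu_loop.induct with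
  | case1 q result hq r q' hr ih =>
    have h1 := PySem.Int.floordiv_mul_add_mod q 5
    have h2 := PySem.Int.mod_nonneg q (b := 5) (by norm_num)
    have h3 := PySem.Int.mod_lt q (b := 5) (by norm_num)
    simp only [r, q'] at hr ih ⊢
    conv_rhs => rw [encode_snafu_alt]
    rw [dif_neg (by omega : ¬ q ≤ 0)]
    rw [encode_snafu_loop, dif_pos hq]
    simp only [r, q']
    rw [if_pos (by omega : PySem.Int.mod q 5 > 2)]
    rcases (by omega : PySem.Int.mod q 5 = 3 ∨ PySem.Int.mod q 5 = 4) with h | h <;>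
      simp only [h] at ih ⊢ <;> simp at ih ⊢ <;>
      simp [ih, strRev_append, strRev_eq, strRev_dash, String.append_assoc]
  | case2 q result hq r q' hr ih =>
    have h1 := PySem.Int.floordiv_mul_add_mod q 5
    have h2 := PySem.Int.mod_nonneg q (b := 5) (by norm_num)
    simp only [r, q'] at hr ih ⊢
    conv_rhs => rw [encode_snafu_alt]
    rw [dif_neg (by omega : ¬ q ≤ 0)]
    rw [encode_snafu_loop, dif_pos hq]
    simp only [r, q']
    rw [if_neg (by omega : ¬ PySem.Int.mod q 5 > 2)]
    rcases (by omega : PySem.Int.mod q 5 = 0 ∨ PySem.Int.mod q 5 = 1 ∨ PySem.Int.mod q 5 = 2)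
      with h | h | h <;>
      simp only [h] at ih ⊢ <;> simp at ih ⊢ <;>
      simp [ih, strRev_append, strRev_d0, strRev_d1, strRev_d2, String.append_assoc]
  | case3 q result hq =>
    rw [encode_snafu_loop, dif_neg hq]
    rw [encode_snafu_alt, dif_pos (by omega)]
    simp [strRev_empty]

-- ===== VERDICT (by name: the statement is the Claim_ definition above) =====
theorem encode_snafu_spec : Claim_equal_encode_snafu := by
  intro n _
  unfold Spec_encode_snafu encode_snafu
  rw [PySem.Str.slice?_none_none_neg_one, Option.getD_some, loop_eq]
  calc String.ofList (("" ++ strRev (encode_snafu_alt n)).toList.reverse)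
      = strRev (strRev (encode_snafu_alt n)) := by simp [strRev]
    _ = encode_snafu_alt n := strRev_rev _
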